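-- pv_equiv track=rewrite | github.com/paulanaomi/ethanol_data_Brazil_ANP | data_exploring.py | get_label_colors
-- ===== SOURCE A (Python) =====
-- def get_label_colors(bar_labels):
--
--     bar_colors = []
--
--     for label in bar_labels:
--         if 'INPASA' in label:
--             bar_colors.append('tab:red')
--         elif 'FS ' in label:
--             bar_colors.append('tab:blue')
--         elif 'RAIZEN' in label:
--             bar_colors.append('tab:orange')
--         elif 'SAO MARTINHO' in label:
--             bar_colors.append('tab:olive')
--         elif 'TROPICAL' in label:
--             bar_colors.append('tab:purple')
--         elif 'ATVOS' in label:
--             bar_colors.append('tab:green')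
--         else:
--             bar_colors.append('tab:gray')
--
--     return bar_colors
-- ===== SOURCE B (Python) =====
-- # Staged-overwrite strategy: paint everything gray, then apply rules from
-- # lowest to highest priority, each pass overwriting matches; the last
-- # (highest-priority) overwrite wins, reproducing the elif priority.
-- REVERSED_RULES = [('ATVOS', 'tab:green'),
--                   ('TROPICAL', 'tab:purple'),
--                   ('SAO MARTINHO', 'tab:olive'),
--                   ('RAIZEN', 'tab:orange'),
--                   ('FS ', 'tab:blue'),
--                   ('INPASA', 'tab:red')]
--
-- def get_label_colors(bar_labels):
--     colors = ['tab:gray'] * len(bar_labels)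
--     for sub, col in REVERSED_RULES:
--         for i, label in enumerate(bar_labels):
--             if sub in label:
--                 colors[i] = col
--     return colors
-- ===== Notes on version B (the rewrite author's own statement) =====
-- stated objective: alternative
-- what changed: Instead of deciding each label's color once via the elif chain, B makes one pass per rule over the whole list in reverse priority order, overwriting an all-gray color array so the highest-priority matching rule is applied last and wins.
import Mathlib
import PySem

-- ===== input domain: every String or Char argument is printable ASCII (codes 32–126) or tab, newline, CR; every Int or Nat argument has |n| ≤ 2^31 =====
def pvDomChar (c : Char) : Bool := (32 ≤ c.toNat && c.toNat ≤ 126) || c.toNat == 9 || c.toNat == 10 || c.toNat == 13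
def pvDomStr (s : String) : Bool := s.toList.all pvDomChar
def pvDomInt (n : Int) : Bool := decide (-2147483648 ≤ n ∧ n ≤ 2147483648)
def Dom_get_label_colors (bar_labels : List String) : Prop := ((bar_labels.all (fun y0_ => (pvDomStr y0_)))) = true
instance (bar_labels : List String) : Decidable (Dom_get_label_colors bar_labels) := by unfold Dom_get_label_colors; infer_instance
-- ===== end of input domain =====

-- B replaces A's per-label elif chain by staged overwrite passes: all-gray, then one pass per rule
-- in reverse priority order, each overwriting matches (alternative decomposition; same cost).

-- ===== PORT A =====
-- per-label elif chain, in A's order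
def pvColorA (label : String) : String :=
  if PySem.Str.isIn "INPASA" label then "tab:red"
  else if PySem.Str.isIn "FS " label then "tab:blue"
  else if PySem.Str.isIn "RAIZEN" label then "tab:orange"
  else if PySem.Str.isIn "SAO MARTINHO" label then "tab:olive"
  else if PySem.Str.isIn "TROPICAL" label then "tab:purple"
  else if PySem.Str.isIn "ATVOS" label then "tab:green"
  else "tab:gray"

def get_label_colors (bar_labels : List String) : List String :=
  bar_labels.foldl (fun bar_colors label => bar_colors ++ [pvColorA label]) []

-- ===== PORT B =====
def pvReversedRules : List (String × String) :=
  [("ATVOS", "tab:green"), ("TROPICAL", "tab:purple"), ("SAO MARTINHO", "tab:olive"),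
   ("RAIZEN", "tab:orange"), ("FS ", "tab:blue"), ("INPASA", "tab:red")]

-- one pass: overwrite colors[i] with col wherever sub occurs in bar_labels[i]
def pvPass (sub col : String) (bar_labels colors : List String) : List String :=
  List.zipWith (fun label c => if PySem.Str.isIn sub label then col else c) bar_labels colors

def get_label_colors_alt (bar_labels : List String) : List String :=
  pvReversedRules.foldl (fun colors sc => pvPass sc.1 sc.2 bar_labels colors)
    (bar_labels.map (fun _ => "tab:gray"))

-- ===== PRECONDITION & SPEC =====
def Spec_get_label_colors (bar_labels : List String) (out : List String) : Prop := out = get_label_colors_alt bar_labels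
instance (bar_labels : List String) (out : List String) : Decidable (Spec_get_label_colors bar_labels out) := by unfold Spec_get_label_colors; infer_instance

-- ===== CLAIM (what is proved, stated in full; the proofs are below) =====
def Claim_equal_get_label_colors : Prop := ∀ (bar_labels : List String), Dom_get_label_colors bar_labels → Spec_get_label_colors bar_labels (get_label_colors bar_labels)

-- ===== LEMMAS AND PROOFS =====

theorem pvZipWith_map_self {α β γ : Type} (f : α → β → γ) (g : α → β) (xs : List α) :
    List.zipWith f xs (xs.map g) = xs.map (fun x => f x (g x)) := by
  induction xs with
  | nil => rfl
  | cons x t ih => simp [ih]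

-- the staged passes are elementwise: fold of passes = map of per-label fold
theorem pvFold_pass (rules : List (String × String)) (bar_labels : List String)
    (g : String → String) :
    rules.foldl (fun colors sc => pvPass sc.1 sc.2 bar_labels colors) (bar_labels.map g)
      = bar_labels.map (fun l =>
          rules.foldl (fun c sc => if PySem.Str.isIn sc.1 l then sc.2 else c) (g l)) := by
  induction rules generalizing g with
  | nil => rfl
  | cons sc rest ih =>
      rw [List.foldl_cons]
      have h1 : pvPass sc.1 sc.2 bar_labels (bar_labels.map g)
          = bar_labels.map (fun l => if PySem.Str.isIn sc.1 l then sc.2 else g l) := by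
        simp [pvPass, pvZipWith_map_self]
      rw [h1, ih]
      simp

-- per label: the reverse-order overwrite fold equals the elif chain
theorem pvElem_eq (l : String) :
    pvReversedRules.foldl (fun c sc => if PySem.Str.isIn sc.1 l then sc.2 else c) "tab:gray"
      = pvColorA l := rfl

theorem pvA_foldl (bar_labels : List String) (acc : List String) :
    bar_labels.foldl (fun bar_colors label => bar_colors ++ [pvColorA label]) acc
      = acc ++ bar_labels.map pvColorA := by
  induction bar_labels generalizing acc with
  | nil => simp
  | cons x xs ih =>
      rw [List.foldl_cons, ih (acc ++ [pvColorA x]), List.map_cons,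
        List.append_assoc, List.singleton_append]

-- ===== VERDICT =====
theorem get_label_colors_spec : Claim_equal_get_label_colors := by
  intro bar_labels _
  unfold Spec_get_label_colors get_label_colors get_label_colors_alt
  rw [pvA_foldl, List.nil_append, pvFold_pass]
  exact List.map_congr_left (fun l _ => (pvElem_eq l).symm)
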